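-- pv_equiv track=rewrite | github.com/JesusF-GonzalezM/Proyecto-AyP | App/Tickets_sale_management/manage_ticket_creation.py | number_is_ondulado
-- ===== SOURCE A (Python) =====
-- def number_is_ondulado(number):
--     number = str(number)
--     if int(number) < 100:
--         return True
--     if len(set(number)) == 1:
--         return True
--
--     if len(set(number)) > 2:
--         return False
--     for i in range(len(number)-1):
--         if number[i] == number[i+1]:
--             return False
--     return True
-- ===== SOURCE B (Python) =====
-- def number_is_ondulado(number):
--     number = str(number)
--     if int(number) < 100:
--         return True
--     # wavy digits = the digit string has period 2; checked by structural
--     # recursion on the list of characters instead of set-counting + index scan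
--     return _period2(list(number))
--
--
-- def _period2(ds):
--     if len(ds) < 3:
--         return True
--     if ds[0] != ds[2]:
--         return False
--     return _period2(ds[1:])
-- ===== Notes on version B (the rewrite author's own statement) =====
-- stated objective: alternative
-- what changed: Replaced A's three-stage test (distinct-digit set size 1 -> True, size > 2 -> False, then an index-based adjacent-pair inequality scan) by a structurally recursive check that the digit string has period 2 (each char equals the one two positions later).
import Mathlib
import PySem

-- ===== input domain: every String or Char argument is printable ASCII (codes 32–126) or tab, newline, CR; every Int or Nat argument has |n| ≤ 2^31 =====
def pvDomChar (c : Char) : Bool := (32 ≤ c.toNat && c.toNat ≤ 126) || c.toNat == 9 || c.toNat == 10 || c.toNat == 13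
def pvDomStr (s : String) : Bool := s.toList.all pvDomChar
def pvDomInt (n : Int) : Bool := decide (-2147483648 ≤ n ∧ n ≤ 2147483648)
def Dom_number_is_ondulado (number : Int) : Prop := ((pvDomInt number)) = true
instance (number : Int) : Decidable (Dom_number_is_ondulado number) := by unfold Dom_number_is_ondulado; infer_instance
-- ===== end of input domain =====

-- B replaces A's distinct-digit-set tests plus index-based adjacent-pair scan by a
-- structurally recursive period-2 check on the character list (objective: alternative).

-- ===== PORT A =====
-- Python: number = str(number); if int(number) < 100: …  — int(str(n)) == n exactly for an
-- int argument, so the guard is ported as `number < 100` (exact; no ValueError is possible).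
def number_is_ondulado (number : Int) : Bool :=
  let s := PySem.Int.toChars number
  if number < 100 then true
  else if PySem.Set.len (PySem.Set.ofList s) = 1 then true
  else if PySem.Set.len (PySem.Set.ofList s) > 2 then false
  else (PySem.List.pyRange 0 ((s.length : Int) - 1) 1).all
        (fun i => !(PySem.List.pyGet? s i == PySem.List.pyGet? s (i + 1)))

-- ===== PORT B =====
-- _period2(ds): True for fewer than 3 chars; False if ds[0] != ds[2]; else recurse on ds[1:]
def pvPeriod2 : List Char → Bool
  | a :: b :: c :: t => if a ≠ c then false else pvPeriod2 (b :: c :: t)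
  | _ => true

def number_is_ondulado_alt (number : Int) : Bool :=
  let s := PySem.Int.toChars number
  if number < 100 then true
  else pvPeriod2 s

-- ===== PRECONDITION & SPEC =====
def Spec_number_is_ondulado (number : Int) (out : Bool) : Prop := out = number_is_ondulado_alt number
instance (number : Int) (out : Bool) : Decidable (Spec_number_is_ondulado number out) := by unfold Spec_number_is_ondulado; infer_instance

-- ===== CLAIM (what is proved, stated in full; the proofs are below) =====
def Claim_equal_number_is_ondulado : Prop := ∀ (number : Int), Dom_number_is_ondulado number → Spec_number_is_ondulado number (number_is_ondulado number)

-- ===== LEMMAS AND PROOFS =====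

-- "no two adjacent characters are equal" — what A's final loop checks
def Pprop (s : List Char) : Prop :=
  ∀ (i : Nat) (h : i + 1 < s.length), s[i]'(by omega) ≠ s[i + 1]'h

-- "the character list has period 2" — what B's recursion checks
def Qprop (s : List Char) : Prop :=
  ∀ (i : Nat) (h : i + 2 < s.length), s[i]'(by omega) = s[i + 2]'h

lemma bool_eq_of_iff {a b : Bool} (h : a = true ↔ b = true) : a = b := by
  cases a <;> cases b <;> simp_all

lemma pyRange_nonpos (b : Int) (hb : b ≤ 0) : PySem.List.pyRange 0 b 1 = [] := by
  simp [PySem.List.pyRange]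
  omega

lemma aloop_iff (s : List Char) :
    ((PySem.List.pyRange 0 ((s.length : Int) - 1) 1).all
        (fun i => !(PySem.List.pyGet? s i == PySem.List.pyGet? s (i + 1))) = true) ↔ Pprop s := by
  rcases s with _ | ⟨a, t⟩
  · rw [pyRange_nonpos _ (by simp)]
    simp [Pprop]
  · have hb : (((a :: t).length : Int) - 1) = ((t.length : Nat) : Int) := by
      simp only [List.length_cons]; omega
    rw [hb, PySem.List.pyRange_zero_natCast, List.all_map]
    simp only [List.all_eq_true, List.mem_range, Function.comp]
    constructor
    · intro hall i h
      have hlt : i < t.length := by simpa using Nat.lt_of_succ_lt_succ h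
      have := hall i hlt
      rw [show ((i : Int) + 1) = ((i + 1 : Nat) : Int) by push_cast; ring] at this
      rw [PySem.List.pyGet?_natCast, PySem.List.pyGet?_natCast] at this
      rw [List.getElem?_eq_getElem (by omega), List.getElem?_eq_getElem h] at this
      simpa using this
    · intro hp i hi
      have h : i + 1 < (a :: t).length := by simpa using Nat.succ_lt_succ hi
      rw [show ((i : Int) + 1) = ((i + 1 : Nat) : Int) by push_cast; ring]
      rw [PySem.List.pyGet?_natCast, PySem.List.pyGet?_natCast]
      rw [List.getElem?_eq_getElem (by omega), List.getElem?_eq_getElem h]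
      simpa using hp i h

-- B's recursion computes exactly the period-2 property
lemma per2_iff (s : List Char) : (pvPeriod2 s = true) ↔ Qprop s := by
  induction s with
  | nil => simp [pvPeriod2, Qprop]
  | cons a t ih =>
    rcases t with _ | ⟨b, u⟩
    · simp [pvPeriod2, Qprop]
    · rcases u with _ | ⟨c, r⟩
      · constructor
        · intro _ i h
          simp at h
        · intro _
          rfl
      · have hstep : pvPeriod2 (a :: b :: c :: r) =
            if a ≠ c then false else pvPeriod2 (b :: c :: r) := rfl
      -- reduce to: a = c ∧ Qprop (b :: c :: r)
        constructor
        · intro hp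
          by_cases hac : a = c
          · rw [hstep, if_neg (by simp [hac])] at hp
            have hq : Qprop (b :: c :: r) := ih.mp hp
            intro i h
            cases i with
            | zero => simpa using hac
            | succ j =>
                have hj : j + 2 < (b :: c :: r).length := by
                  simp only [List.length_cons] at h ⊢; omega
                simpa using hq j hj
          · rw [hstep, if_pos (by simp [hac])] at hp
            exact absurd hp (by simp)
        · intro hq
          have hac : a = c := by
            have h0 : (0 : Nat) + 2 < (a :: b :: c :: r).length := by
              simp only [List.length_cons]; omega
            simpa using hq 0 h0
          rw [hstep, if_neg (by simp [hac])]
          apply ih.mpr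
          intro j hj
          have h : j + 1 + 2 < (a :: b :: c :: r).length := by
            simp only [List.length_cons] at hj ⊢; omega
          simpa using hq (j + 1) h

lemma setlen_eq_card (s : List Char) :
    PySem.Set.len (PySem.Set.ofList s) = (s.toFinset.card : Int) := by
  have h1 : (PySem.List.dedup s).toFinset = s.toFinset := by
    ext x
    simp
  have h2 : (PySem.List.dedup s).toFinset.card = (PySem.List.dedup s).length :=
    List.toFinset_card_of_nodup (PySem.List.nodup_dedup s)
  have h3 : PySem.List.dedup s = PySem.Set.ofList s := PySem.List.dedup_eq_ofList s
  calc PySem.Set.len (PySem.Set.ofList s)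
      = ((PySem.Set.ofList s).length : Int) := rfl
    _ = ((PySem.List.dedup s).length : Int) := by rw [h3]
    _ = ((PySem.List.dedup s).toFinset.card : Int) := by rw [h2]
    _ = ((s.toFinset.card : Nat) : Int) := by rw [h1]

-- period 2 propagates: s[i] = s[i + 2k]
lemma q_step {s : List Char} (hq : Qprop s) :
    ∀ (k i : Nat) (h : i + 2 * k < s.length), s[i]'(by omega) = s[i + 2 * k]'h := by
  intro k
  induction k with
  | zero => intro i h; simp
  | succ k ih =>
      intro i h
      have h2 : i + 2 < s.length := by omega
      have e1 : s[i]'(by omega) = s[i + 2]'h2 := hq i h2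
      have e2 : s[i + 2]'h2 = s[i + 2 + 2 * k]'(by omega) := ih (i + 2) (by omega)
      rw [e1, e2]
      congr 1
      omega

-- same parity ⇒ same character, under period 2
lemma q_parity {s : List Char} (hq : Qprop s) (i j : Nat)
    (hi : i < s.length) (hj : j < s.length) (hp : i % 2 = j % 2) :
    s[i] = s[j] := by
  rcases Nat.le_total i j with hle | hle
  · obtain ⟨k, hk⟩ : ∃ k, j = i + 2 * k := ⟨(j - i) / 2, by omega⟩
    subst hk
    exact q_step hq k i hj
  · obtain ⟨k, hk⟩ : ∃ k, i = j + 2 * k := ⟨(i - j) / 2, by omega⟩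
    subst hk
    exact (q_step hq k j hi).symm

-- at most one distinct character ⇒ period 2
lemma q_of_card_le_one {s : List Char} (h : s.toFinset.card ≤ 1) : Qprop s := by
  intro i hlt
  have hall := Finset.card_le_one.mp h
  exact hall _ (List.mem_toFinset.mpr (s.getElem_mem _)) _ (List.mem_toFinset.mpr (s.getElem_mem _))

-- period 2 ⇒ at most two distinct characters
lemma card_le_two_of_q {s : List Char} (hq : Qprop s) : s.toFinset.card ≤ 2 := by
  by_cases hl : 2 ≤ s.length
  · have h0 : 0 < s.length := by omega
    have h1 : 1 < s.length := by omega
    have hsub : s.toFinset ⊆ {s[0], s[1]} := by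
      intro x hx
      obtain ⟨j, hj, rfl⟩ := List.mem_iff_getElem.mp (List.mem_toFinset.mp hx)
      rcases Nat.mod_two_eq_zero_or_one j with hp | hp
      · have := q_parity hq 0 j h0 hj (by omega)
        simp [← this]
      · have := q_parity hq 1 j h1 hj (by omega)
        simp [← this]
    calc s.toFinset.card ≤ ({s[0], s[1]} : Finset Char).card := Finset.card_le_card hsub
      _ ≤ 2 := by
          apply le_trans (Finset.card_insert_le _ _)
          simp
  · calc s.toFinset.card ≤ s.length := s.toFinset_card_le
      _ ≤ 2 := by omega

-- no adjacent equal + at most two distinct ⇒ period 2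
lemma q_of_p {s : List Char} (hcard : s.toFinset.card ≤ 2) (hp : Pprop s) : Qprop s := by
  intro i h
  by_contra hne
  have hab : s[i]'(by omega) ≠ s[i + 1]'(by omega) := hp i (by omega)
  have hbc : s[i + 1]'(by omega) ≠ s[i + 2]'h := hp (i + 1) (by omega)
  have hsub : ({s[i]'(by omega), s[i + 1]'(by omega), s[i + 2]'h} : Finset Char) ⊆ s.toFinset := by
    intro x hx
    simp only [Finset.mem_insert, Finset.mem_singleton] at hx
    rcases hx with rfl | rfl | rfl <;> exact List.mem_toFinset.mpr (s.getElem_mem _)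
  have h3 : ({s[i]'(by omega), s[i + 1]'(by omega), s[i + 2]'h} : Finset Char).card = 3 :=
    Finset.card_eq_three.mpr ⟨_, _, _, hab, hne, hbc, rfl⟩
  have := Finset.card_le_card hsub
  omega

-- period 2 + some adjacent pair equal ⇒ everything equal
lemma card_le_one_of_q_not_p {s : List Char} (hq : Qprop s) (hnp : ¬ Pprop s) :
    s.toFinset.card ≤ 1 := by
  simp only [Pprop, not_forall] at hnp
  obtain ⟨i, h, heq⟩ := hnp
  simp only [not_not] at heq
  apply Finset.card_le_one.mpr
  intro x hx y hy
  obtain ⟨j, hj, rfl⟩ := List.mem_iff_getElem.mp (List.mem_toFinset.mp hx)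
  obtain ⟨k, hk, rfl⟩ := List.mem_iff_getElem.mp (List.mem_toFinset.mp hy)
  have key : ∀ (m : Nat) (hm : m < s.length), s[m] = s[i]'(by omega) := by
    intro m hm
    rcases Nat.decEq (m % 2) (i % 2) with hne | hpar
    · have hpar2 : m % 2 = (i + 1) % 2 := by omega
      have := q_parity hq m (i + 1) hm h hpar2
      rw [this, ← heq]
    · exact q_parity hq m i hm (by omega) hpar
  rw [key j hj, key k hk]

-- the heart of the file: A's three-stage decision equals B's recursive period-2 test
lemma core (s : List Char) :
    (if PySem.Set.len (PySem.Set.ofList s) = 1 then true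
     else if PySem.Set.len (PySem.Set.ofList s) > 2 then false
     else (PySem.List.pyRange 0 ((s.length : Int) - 1) 1).all
            (fun i => !(PySem.List.pyGet? s i == PySem.List.pyGet? s (i + 1)))) =
    pvPeriod2 s := by
  rw [setlen_eq_card]
  by_cases h1 : s.toFinset.card = 1
  · have hg1 : ((s.toFinset.card : Int) = 1) = True := by simp [h1]
    simp only [hg1, if_true]
    exact ((per2_iff s).mpr (q_of_card_le_one (by omega))).symm
  · by_cases h2 : 2 < s.toFinset.card
    · have hg : ((s.toFinset.card : Int) = 1) = False := by simp; omega
      have hg2 : ((s.toFinset.card : Int) > 2) = True := by simp; omega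
      simp only [hg, hg2, if_false, if_true]
      cases hb : pvPeriod2 s with
      | false => rfl
      | true => exact absurd (card_le_two_of_q ((per2_iff s).mp hb)) (by omega)
    · have hg : ((s.toFinset.card : Int) = 1) = False := by simp; omega
      have hg2 : ((s.toFinset.card : Int) > 2) = False := by simp; omega
      simp only [hg, hg2, if_false]
      apply bool_eq_of_iff
      rw [aloop_iff, per2_iff]
      constructor
      · intro hp
        exact q_of_p (by omega) hp
      · intro hq
        by_contra hnp
        have hc := card_le_one_of_q_not_p hq hnp
        have hc0 : s.toFinset.card = 0 := by omega
        have hs : s = [] := by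
          rcases s with _ | ⟨a, t⟩
          · rfl
          · exfalso
            have hmem : a ∈ (a :: t).toFinset := List.mem_toFinset.mpr (by simp)
            rw [Finset.card_eq_zero.mp hc0] at hmem
            simp at hmem
        rw [hs] at hnp
        exact hnp (fun i h => by simp at h)

-- ===== VERDICT (by name: the statement is the Claim_ definition above) =====
theorem number_is_ondulado_spec : Claim_equal_number_is_ondulado := by
  intro number _
  unfold Spec_number_is_ondulado number_is_ondulado number_is_ondulado_alt
  by_cases hn : number < 100
  · simp [hn]
  · simp only [hn, if_false]
    exact core (PySem.Int.toChars number)
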